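-- pv_equiv track=rewrite | github.com/cgabr/finance | base/mysqlite.py | demask
-- ===== SOURCE A (Python) =====
-- def demask (field):
--
--     field1     = ""
--     make_lower = False
--     for o in field:
--         if make_lower:
--             field1 = field1 + o.lower()
--             make_lower = False
--         else:
--             if o == "_":
--                 make_lower = True
--             else:
--                 field1 = field1 + o
--     return(field1)
-- ===== SOURCE B (Python) =====
-- def demask(field):
--     it = iter(field)
--     out = []
--     for c in it:
--         if c == "_":
--             out.append(next(it, "").lower())
--         else:
--             out.append(c)
--     return "".join(out)
-- ===== Notes on version B (the rewrite author's own statement) =====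
-- stated objective: idiomatic
-- what changed: Replaced the boolean-flag state machine with repeated string concatenation by an iterator loop that directly consumes (and lowercases) the character following each underscore, joining a list once at the end.
import Mathlib
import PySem

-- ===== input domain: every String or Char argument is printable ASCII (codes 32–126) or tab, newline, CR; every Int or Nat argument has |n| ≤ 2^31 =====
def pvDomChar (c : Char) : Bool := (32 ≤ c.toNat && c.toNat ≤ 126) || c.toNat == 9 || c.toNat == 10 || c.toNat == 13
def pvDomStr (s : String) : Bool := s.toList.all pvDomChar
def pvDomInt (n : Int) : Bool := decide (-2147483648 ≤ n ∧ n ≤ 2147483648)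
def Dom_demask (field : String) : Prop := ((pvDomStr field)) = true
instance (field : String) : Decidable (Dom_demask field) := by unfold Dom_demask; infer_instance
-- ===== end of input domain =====

-- B replaces A's boolean-flag state machine by an iterator that directly consumes
-- the character after each underscore; equivalence on the whole domain (A is total).

-- ===== PORT A =====
-- literal port: for-loop over field with accumulator string field1 and flag make_lower
def demask (field : String) : String :=
  (field.toList.foldl
    (fun (st : String × Bool) o =>
      if st.2 then (st.1 ++ String.singleton (PySem.Chars.lowerChar o), false)
      else if o = '_' then (st.1, true)
      else (st.1 ++ String.singleton o, false))
    ("", false)).1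

-- ===== PORT B =====
-- literal port of Source B's iterator loop: each '_' consumes the next char from the
-- iterator (lowercased); next(it, "") at end of input contributes nothing
def demaskAltGo : List Char → List Char
  | [] => []
  | c :: rest =>
      if c = '_' then
        match rest with
        | [] => []
        | d :: r => PySem.Chars.lowerChar d :: demaskAltGo r
      else c :: demaskAltGo rest

def demask_alt (field : String) : String := String.ofList (demaskAltGo field.toList)

-- ===== PRECONDITION & SPEC =====
def Spec_demask (field : String) (out : String) : Prop := out = demask_alt field
instance (field : String) (out : String) : Decidable (Spec_demask field out) := by unfold Spec_demask; infer_instance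

-- ===== CLAIM (what is proved, stated in full; the proofs are below) =====
def Claim_equal_demask : Prop := ∀ (field : String), Dom_demask field → Spec_demask field (demask field)

-- ===== LEMMAS AND PROOFS =====

theorem push_ofList (s : String) (c : Char) (t : List Char) :
    s.push c ++ String.ofList t = s ++ String.ofList (c :: t) := by
  apply String.ext; simp

-- the A-side loop from state (s, false) appends exactly demaskAltGo l; from state
-- (s, true) it appends demaskAltGo ('_' :: l)
theorem demask_loop_inv (l : List Char) : ∀ (s : String),
    (List.foldl
      (fun (st : String × Bool) o =>
        if st.2 then (st.1 ++ String.singleton (PySem.Chars.lowerChar o), false)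
        else if o = '_' then (st.1, true)
        else (st.1 ++ String.singleton o, false))
      (s, false) l).1 = s ++ String.ofList (demaskAltGo l)
    ∧
    (List.foldl
      (fun (st : String × Bool) o =>
        if st.2 then (st.1 ++ String.singleton (PySem.Chars.lowerChar o), false)
        else if o = '_' then (st.1, true)
        else (st.1 ++ String.singleton o, false))
      (s, true) l).1 = s ++ String.ofList (demaskAltGo ('_' :: l)) := by
  induction l with
  | nil =>
      intro s
      constructor <;> (apply String.ext; simp [demaskAltGo])
  | cons c rest ih =>
      intro s
      constructor
      · by_cases hc : c = '_'
        · subst hc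
          simpa [demaskAltGo] using (ih s).2
        · have h := (ih (s ++ String.singleton c)).1
          simp only [List.foldl_cons, Bool.false_eq_true, if_false, if_neg hc]
          rw [h, show demaskAltGo (c :: rest) = c :: demaskAltGo rest by
            rw [demaskAltGo.eq_def]; simp [hc]]
          rw [← push_ofList]
          simp [String.push]
      · have h := (ih (s ++ String.singleton (PySem.Chars.lowerChar c))).1
        simp only [List.foldl_cons, if_true]
        rw [h]
        have : demaskAltGo ('_' :: c :: rest) = PySem.Chars.lowerChar c :: demaskAltGo rest := by
          simp [demaskAltGo]
        rw [this, ← push_ofList]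
        simp [String.push]

-- ===== VERDICT (by name: the statement is the Claim_ definition above) =====
theorem demask_spec : Claim_equal_demask := by
  intro field _
  show _ = _
  unfold demask demask_alt
  rw [(demask_loop_inv field.toList "").1]
  apply String.ext; simp
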